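-- pv_equiv track=rewrite | github.com/zax0rz/darkpawns | scripts/dp_session_consolidate.py | template_summary
-- ===== SOURCE A (Python) =====
-- def template_summary(memories, agent_name: str) -> str:
--     """Fallback: structured summary without LLM."""
--     kills = [m for m in memories if m[1] == "MOB_KILL"]
--     deaths = [m for m in memories if m[1] == "PLAYER_DEATH"]
--     other = [m for m in memories if m[1] not in ("MOB_KILL", "PLAYER_DEATH")]
--
--     parts = []
--     if kills:
--         parts.append(f"{len(kills)} kill(s)")
--     if deaths:
--         parts.append(f"{len(deaths)} death(s)")
--     if other:
--         parts.append(f"{len(other)} other event(s)")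
--
--     summary = f"Session summary for {agent_name}: " + (", ".join(parts) if parts else "no recorded events") + "."
--
--     if kills:
--         kill_descs = [m[2][:60] for m in kills[:3]]
--         summary += " Notable kills: " + "; ".join(kill_descs) + "."
--     if deaths:
--         death_descs = [m[2][:60] for m in deaths[:2]]
--         summary += " Deaths: " + "; ".join(death_descs) + "."
--
--     return summary
-- ===== SOURCE B (Python) =====
-- def template_summary(memories, agent_name: str) -> str:
--     """Fallback: structured summary without LLM (single pass)."""
--     kill_count = death_count = other_count = 0
--     kill_descs = []
--     death_descs = []
--     for m in memories:
--         if m[1] == "MOB_KILL":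
--             kill_count += 1
--             if len(kill_descs) < 3:
--                 kill_descs.append(m[2][:60])
--         elif m[1] == "PLAYER_DEATH":
--             death_count += 1
--             if len(death_descs) < 2:
--                 death_descs.append(m[2][:60])
--         else:
--             other_count += 1
--
--     parts = []
--     if kill_count:
--         parts.append(f"{kill_count} kill(s)")
--     if death_count:
--         parts.append(f"{death_count} death(s)")
--     if other_count:
--         parts.append(f"{other_count} other event(s)")
--
--     summary = f"Session summary for {agent_name}: " + (", ".join(parts) if parts else "no recorded events") + "."
--
--     if kill_count:
--         summary += " Notable kills: " + "; ".join(kill_descs) + "."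
--     if death_count:
--         summary += " Deaths: " + "; ".join(death_descs) + "."
--
--     return summary
-- ===== Notes on version B (the rewrite author's own statement) =====
-- stated objective: alternative
-- what changed: Replaced A's three full filter passes (plus re-slicing the kill/death lists) with one pass that keeps three counters and two bounded description buffers.
import Mathlib
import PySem

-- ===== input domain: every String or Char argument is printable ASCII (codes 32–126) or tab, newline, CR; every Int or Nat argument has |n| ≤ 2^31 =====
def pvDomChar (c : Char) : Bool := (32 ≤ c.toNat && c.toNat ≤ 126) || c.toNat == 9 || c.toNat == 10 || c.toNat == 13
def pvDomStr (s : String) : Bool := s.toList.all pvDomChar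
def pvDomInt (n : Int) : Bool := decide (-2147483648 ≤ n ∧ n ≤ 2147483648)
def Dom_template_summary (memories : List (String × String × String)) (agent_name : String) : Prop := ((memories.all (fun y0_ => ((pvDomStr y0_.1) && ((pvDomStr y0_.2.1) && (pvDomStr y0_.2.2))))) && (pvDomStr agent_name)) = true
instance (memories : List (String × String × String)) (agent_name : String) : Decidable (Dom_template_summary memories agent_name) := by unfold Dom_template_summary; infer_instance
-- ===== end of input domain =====

-- B replaces A's three filter passes over `memories` with one fold keeping three counters
-- and two bounded description buffers (objective: alternative single-pass decomposition).


-- shared primitive: Python's m[2][:60] (exact: nonnegative bound slice)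
def pyT60 (s : String) : String := PySem.Str.slice s none (some 60)

-- ===== PORT A =====
def template_summary (memories : List (String × String × String)) (agent_name : String) : String :=
  let kills := memories.filter (fun m => m.2.1 == "MOB_KILL")
  let deaths := memories.filter (fun m => m.2.1 == "PLAYER_DEATH")
  let other := memories.filter (fun m => !(m.2.1 == "MOB_KILL" || m.2.1 == "PLAYER_DEATH"))
  let parts : List String :=
    (if kills.isEmpty then [] else [PySem.Int.toStr (kills.length : Int) ++ " kill(s)"]) ++
    (if deaths.isEmpty then [] else [PySem.Int.toStr (deaths.length : Int) ++ " death(s)"]) ++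
    (if other.isEmpty then [] else [PySem.Int.toStr (other.length : Int) ++ " other event(s)"])
  let summary := "Session summary for " ++ agent_name ++ ": " ++
    (if parts.isEmpty then "no recorded events" else PySem.Str.join ", " parts) ++ "."
  -- kills[:3] / deaths[:2]: nonnegative bound, exactly List.take
  let summary := if kills.isEmpty then summary else
    summary ++ " Notable kills: " ++ PySem.Str.join "; " ((kills.take 3).map (fun m => pyT60 m.2.2)) ++ "."
  let summary := if deaths.isEmpty then summary else
    summary ++ " Deaths: " ++ PySem.Str.join "; " ((deaths.take 2).map (fun m => pyT60 m.2.2)) ++ "."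
  summary

-- ===== PORT B =====
-- loop body of B's single pass: (kill_count, death_count, other_count, kill_descs, death_descs)
def pvStepB (st : Int × Int × Int × List String × List String) (m : String × String × String) :
    Int × Int × Int × List String × List String :=
  match st with
  | (k, d, o, kb, db) =>
    if m.2.1 == "MOB_KILL" then
      (k + 1, d, o, if kb.length < 3 then kb ++ [pyT60 m.2.2] else kb, db)
    else if m.2.1 == "PLAYER_DEATH" then
      (k, d + 1, o, kb, if db.length < 2 then db ++ [pyT60 m.2.2] else db)
    else
      (k, d, o + 1, kb, db)

def template_summary_alt (memories : List (String × String × String)) (agent_name : String) : String :=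
  match memories.foldl pvStepB (0, 0, 0, [], []) with
  | (k, d, o, kb, db) =>
    let parts : List String :=
      (if k == 0 then [] else [PySem.Int.toStr k ++ " kill(s)"]) ++
      (if d == 0 then [] else [PySem.Int.toStr d ++ " death(s)"]) ++
      (if o == 0 then [] else [PySem.Int.toStr o ++ " other event(s)"])
    let summary := "Session summary for " ++ agent_name ++ ": " ++
      (if parts.isEmpty then "no recorded events" else PySem.Str.join ", " parts) ++ "."
    let summary := if k == 0 then summary else
      summary ++ " Notable kills: " ++ PySem.Str.join "; " kb ++ "."
    let summary := if d == 0 then summary else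
      summary ++ " Deaths: " ++ PySem.Str.join "; " db ++ "."
    summary

-- ===== PRECONDITION & SPEC =====
def Spec_template_summary (memories : List (String × String × String)) (agent_name : String) (out : String) : Prop := out = template_summary_alt memories agent_name
instance (memories : List (String × String × String)) (agent_name : String) (out : String) : Decidable (Spec_template_summary memories agent_name out) := by unfold Spec_template_summary; infer_instance

-- ===== CLAIM (what is proved, stated in full; the proofs are below) =====
def Claim_equal_template_summary : Prop := ∀ (memories : List (String × String × String)) (agent_name : String), Dom_template_summary memories agent_name → Spec_template_summary memories agent_name (template_summary memories agent_name)

-- ===== LEMMAS AND PROOFS =====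

-- B's fold computes exactly the lengths and truncated prefixes A obtains by filtering.
theorem pvFold_spec (l : List (String × String × String)) :
    l.foldl pvStepB (0, 0, 0, [], []) =
      (((l.filter (fun m => m.2.1 == "MOB_KILL")).length : Int),
       ((l.filter (fun m => m.2.1 == "PLAYER_DEATH")).length : Int),
       ((l.filter (fun m => !(m.2.1 == "MOB_KILL" || m.2.1 == "PLAYER_DEATH"))).length : Int),
       ((l.filter (fun m => m.2.1 == "MOB_KILL")).take 3).map (fun m => pyT60 m.2.2),
       ((l.filter (fun m => m.2.1 == "PLAYER_DEATH")).take 2).map (fun m => pyT60 m.2.2)) := by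
  induction l using List.reverseRecOn with
  | nil => rfl
  | append_singleton l m ih =>
    rw [List.foldl_append, ih]
    simp only [List.foldl_cons, List.foldl_nil, List.filter_append, List.filter_cons,
      List.filter_nil, pvStepB]
    by_cases hk : m.2.1 == "MOB_KILL"
    · have hd : ¬ (m.2.1 == "PLAYER_DEATH") := by simp_all
      simp only [hk, hd, if_true, Bool.true_or, Bool.not_true, Bool.false_eq_true, if_false]
      refine Prod.ext ?_ (Prod.ext ?_ (Prod.ext ?_ (Prod.ext ?_ ?_)))
      · show _ = ((_ : Nat) : Int); push_cast; simp
      · simp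
      · simp
      · show (if _ then _ else _) = _
        simp only [List.length_map, List.length_take]
        by_cases h3 : (l.filter (fun m => m.2.1 == "MOB_KILL")).length < 3
        · rw [if_pos (by omega), List.take_of_length_le (by omega),
            List.take_of_length_le (by simp; omega)]
          simp
        · rw [if_neg (by omega), List.take_append_of_le_length (by omega)]
      · simp
    · by_cases hd : m.2.1 == "PLAYER_DEATH"
      · simp only [hk, hd, if_true, Bool.false_eq_true, if_false, Bool.false_or, Bool.not_true]
        refine Prod.ext ?_ (Prod.ext ?_ (Prod.ext ?_ (Prod.ext ?_ ?_)))
        · simp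
        · show _ = ((_ : Nat) : Int); push_cast; simp
        · simp
        · simp
        · show (if _ then _ else _) = _
          simp only [List.length_map, List.length_take]
          by_cases h2 : (l.filter (fun m => m.2.1 == "PLAYER_DEATH")).length < 2
          · rw [if_pos (by omega), List.take_of_length_le (by omega),
              List.take_of_length_le (by simp; omega)]
            simp
          · rw [if_neg (by omega), List.take_append_of_le_length (by omega)]
      · simp only [hk, hd, Bool.false_eq_true, if_false, Bool.false_or, Bool.not_false, if_true]
        refine Prod.ext ?_ (Prod.ext ?_ (Prod.ext ?_ (Prod.ext ?_ ?_))) <;> simp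

-- ===== VERDICT (by name: the statement is the Claim_ definition above) =====
theorem template_summary_spec : Claim_equal_template_summary := by
  intro memories agent_name _
  unfold Spec_template_summary template_summary template_summary_alt
  rw [pvFold_spec]
  simp only []
  have hcast : ∀ (xs : List (String × String × String)),
      (((xs.length : Int) == 0) = xs.isEmpty) := by
    intro xs; cases xs
    · simp
    · simp
      omega
  rw [hcast, hcast, hcast]
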